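-- pv_equiv track=rewrite | github.com/DeathReaperRH21/yahtzee | yahtzee.py | scoreTheDice
-- ===== SOURCE A (Python) =====
-- def unique(list1):
--   '''Returns a list of all of the unique values in a list'''
--   unique_list = []
--   for x in list1:
--       # Iterateis over a list and adds only the values that aren't already in the list
--       if x not in unique_list:
--           unique_list.append(x)
--   return unique_list
--
-- def scoreTheDice(listCat, choiceIndex, nums):
--    '''Determines how much points a list of dice is worth'''
--    choice = listCat[choiceIndex]
--    if(choice == 'Ones'):
--        return 1 * nums.count(1)
--    elif(choice == 'Twos'):
--        return 2 * nums.count(2)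
--    elif(choice == 'Threes'):
--        return 3 * nums.count(3)
--    elif(choice == 'Fours'):
--        return 4 * nums.count(4)
--    elif(choice == 'Fives'):
--        return 5 * nums.count(5)
--    elif(choice == 'Sixes'):
--        return 6 * nums.count(6)
--    elif(choice == '3 of a Kind'):
--        # Sees if ones of the numbers in the list shows up at least three times
--        for i in nums:
--            if(nums.count(i) >= 3):
--                return sum(nums)
--        return 0
--    elif(choice == '4 of a Kind'):
--        # Sees if one of the numbers in the list shows up at least four times
--        for i in nums:
--            if(nums.count(i) >= 4):
--                return sum(nums)
--        return 0
--    elif(choice == 'Full House'):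
--        nums.sort()
--        # Sees if the first number appears 2 times while the last appears 3 times
--        if(nums.count(nums[0]) == 2 and nums.count(nums[4]) == 3):
--            return 25
--        # Sees if the first number appears 3 times while the last appears 2 times
--        elif(nums.count(nums[0]) == 3 and nums.count(nums[4]) == 2):
--            return 25
--        else:
--            return 0
--    elif(choice == 'Small Straight'):
--        unique_list = unique(nums)
--        unique_list.sort()
--        # Four numbers are in increasing order
--        if(len(unique_list) >= 4 and all(unique_list[i] == unique_list[i-1] + 1 for i in range(1, len(unique_list)))):
--            return 30
--        else:
--            return 0
--    elif(choice == 'Large Straight'):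
--        unique_list = unique(nums)
--        unique_list.sort()
--        # Five numbers are in increasing order
--        if(len(unique_list) == 5 and all(unique_list[i] == unique_list[i-1] + 1 for i in range(1, len(unique_list)))):
--            return 40
--        else:
--            return 0
--    elif(choice == 'Yahtzee'):
--        # There is only one unique number in the list meaning all five numbers are the same
--        if(len(unique(nums)) == 1):
--            return 50
--        else:
--            return 0
--    elif(choice == 'Chance'):
--        return sum(nums)
--    else:
--        # Error handling here if here
--        return 0
-- ===== SOURCE B (Python) =====
-- def scoreTheDice(listCat, choiceIndex, nums):
--     '''Determines how much points a list of dice is worth'''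
--     choice = listCat[choiceIndex]
--     # Run-length encode the sorted dice once: runs = [(value, multiplicity)]
--     # with strictly increasing values; every category score is then computed
--     # from the runs into one table, and the answer is a single table lookup.
--     runs = []
--     s = sorted(nums)
--     i = 0
--     while i < len(s):
--         j = i + 1
--         while j < len(s) and s[j] == s[i]:
--             j += 1
--         runs.append((s[i], j - i))
--         i = j
--     vals = [v for v, _ in runs]                      # sorted distinct values
--     mult = max((c for _, c in runs), default=0)      # largest multiplicity
--     total = sum(v * c for v, c in runs)              # sum of all dice
--     straight = all(b == a + 1 for a, b in zip(vals, vals[1:]))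
--     table = {name: (f + 1) * next((c for v, c in runs if v == f + 1), 0)
--              for f, name in enumerate(['Ones', 'Twos', 'Threes', 'Fours', 'Fives', 'Sixes'])}
--     table['3 of a Kind'] = total if mult >= 3 else 0
--     table['4 of a Kind'] = total if mult >= 4 else 0
--     table['Full House'] = 25 if sorted(c for _, c in runs) == [2, 3] else 0
--     table['Small Straight'] = 30 if len(vals) >= 4 and straight else 0
--     table['Large Straight'] = 40 if len(vals) == 5 and straight else 0
--     table['Yahtzee'] = 50 if len(runs) == 1 else 0
--     table['Chance'] = total
--     return table.get(choice, 0)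
-- ===== Notes on version B (the rewrite author's own statement) =====
-- stated objective: alternative
-- what changed: B run-length encodes the sorted dice once into (value, multiplicity) runs, computes every category's score from the runs into one table (faces from the run of that value, kinds from the largest multiplicity, Full House from the sorted multiplicities being [2,3], straights from adjacent distinct values being consecutive, Yahtzee from there being one run), and returns a single table lookup, replacing A's if/elif dispatch with per-category count()/unique() rescans; A also sorts nums in place in the Full House branch, B does not (equivalence is about the return value).
-- outside the precondition, e.g. on scoreTheDice(['Full House'], 0, [1, 1, 2, 2, 2, 3]): A returns 25, B returns 0
import Mathlib
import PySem

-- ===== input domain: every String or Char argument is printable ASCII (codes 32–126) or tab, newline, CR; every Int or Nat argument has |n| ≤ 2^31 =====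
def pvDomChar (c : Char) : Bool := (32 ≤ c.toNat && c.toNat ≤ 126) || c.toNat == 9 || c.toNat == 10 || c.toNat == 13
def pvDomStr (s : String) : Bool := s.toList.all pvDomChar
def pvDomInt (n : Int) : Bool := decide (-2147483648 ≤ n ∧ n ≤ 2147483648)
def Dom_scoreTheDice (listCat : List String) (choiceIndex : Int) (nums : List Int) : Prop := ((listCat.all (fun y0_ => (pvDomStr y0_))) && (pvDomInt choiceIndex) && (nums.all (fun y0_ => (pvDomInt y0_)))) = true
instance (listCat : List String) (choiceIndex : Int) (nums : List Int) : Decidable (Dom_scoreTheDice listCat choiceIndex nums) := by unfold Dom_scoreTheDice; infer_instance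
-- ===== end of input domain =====

-- B run-length encodes the sorted dice once and computes every category's score from the runs
-- into one table, returning a single lookup, instead of A's if/elif dispatch with per-category
-- count()/unique() rescans; equivalence is about the RETURN value only (A sorts nums in place
-- in the 'Full House' branch, B does not mutate its argument).

-- ===== PORT A =====
-- A's helper 'unique'
def pvUnique (list1 : List Int) : List Int :=
  list1.foldl (fun acc x => if x ∈ acc then acc else acc ++ [x]) []

-- A's '3/4 of a Kind' loop: first i with nums.count i ≥ k returns sum(nums), else 0
def pvKindLoop (nums : List Int) (rest : List Int) (k : Nat) : Int :=
  match rest with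
  | [] => 0
  | i :: t => if k ≤ nums.count i then nums.sum else pvKindLoop nums t k

-- A's 'all(u[i] == u[i-1] + 1 for i in range(1, len(u)))' (indices are in range)
def pvConsec (u : List Int) : Bool :=
  (PySem.List.pyRange 1 (u.length : Int) 1).all
    (fun i => PySem.List.pyGetD u i 0 == PySem.List.pyGetD u (i - 1) 0 + 1)

def scoreTheDice (listCat : List String) (choiceIndex : Int) (nums : List Int) : Int :=
  match PySem.List.pyGet? listCat choiceIndex with
  | none => 0  -- IndexError in Python; excluded by Pre_
  | some choice =>
    if choice = "Ones" then 1 * (nums.count 1 : Int)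
    else if choice = "Twos" then 2 * (nums.count 2 : Int)
    else if choice = "Threes" then 3 * (nums.count 3 : Int)
    else if choice = "Fours" then 4 * (nums.count 4 : Int)
    else if choice = "Fives" then 5 * (nums.count 5 : Int)
    else if choice = "Sixes" then 6 * (nums.count 6 : Int)
    else if choice = "3 of a Kind" then pvKindLoop nums nums 3
    else if choice = "4 of a Kind" then pvKindLoop nums nums 4
    else if choice = "Full House" then
      let s := PySem.List.sorted nums (fun x => x) false
      match PySem.List.pyGet? s 0, PySem.List.pyGet? s 4 with
      | some a, some b =>
        if s.count a = 2 ∧ s.count b = 3 then 25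
        else if s.count a = 3 ∧ s.count b = 2 then 25
        else 0
      | _, _ => 0  -- IndexError in Python; excluded by Pre_
    else if choice = "Small Straight" then
      let u := PySem.List.sorted (pvUnique nums) (fun x => x) false
      if 4 ≤ u.length ∧ pvConsec u then 30 else 0
    else if choice = "Large Straight" then
      let u := PySem.List.sorted (pvUnique nums) (fun x => x) false
      if u.length = 5 ∧ pvConsec u then 40 else 0
    else if choice = "Yahtzee" then
      if (pvUnique nums).length = 1 then 50 else 0
    else if choice = "Chance" then nums.sum
    else 0

-- ===== PORT B =====
-- B's run-length-encoding scan: the inner while advances j over the run of dice equal to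
-- s[i] (the takeWhile prefix), the outer step emits (s[i], j - i) and resumes at i = j
-- (the dropWhile remainder); each recursive step consumes exactly one run.
def pvRle (s : List Int) : List (Int × Int) :=
  match s with
  | [] => []
  | v :: t =>
    ((v, ((List.takeWhile (fun x => x == v) (v :: t)).length : Int))
      :: pvRle (List.dropWhile (fun x => x == v) (v :: t)))
termination_by s.length
decreasing_by
  have h1 : List.dropWhile (fun x => x == v) (v :: t) = List.dropWhile (fun x => x == v) t :=
    List.dropWhile_cons_of_pos (by simp)
  have h2 := List.length_dropWhile_le (fun x => x == v) t
  simp only [h1, List.length_cons]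
  omega

def pvFaces : List String := ["Ones", "Twos", "Threes", "Fours", "Fives", "Sixes"]

def scoreTheDice_alt (listCat : List String) (choiceIndex : Int) (nums : List Int) : Int :=
  match PySem.List.pyGet? listCat choiceIndex with
  | none => 0  -- IndexError in Python; excluded by Pre_
  | some choice =>
    let runs := pvRle (PySem.List.sorted nums (fun x => x) false)
    let vals := runs.map Prod.fst
    let mult := PySem.List.maxD (runs.map Prod.snd) (fun c => c) 0
    let total := (runs.map (fun p => p.1 * p.2)).sum
    let straight :=
      (vals.zip (PySem.List.slice vals (some 1) none)).all (fun p => p.2 == p.1 + 1)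
    let table0 : PySem.Dict String Int :=
      (PySem.List.enumerate pvFaces 0).foldl
        (fun d p => d.insert p.2
          ((p.1 + 1) * (((runs.find? (fun q => q.1 == p.1 + 1)).map Prod.snd).getD 0)))
        PySem.Dict.empty
    let table1 := table0.insert "3 of a Kind" (if 3 ≤ mult then total else 0)
    let table2 := table1.insert "4 of a Kind" (if 4 ≤ mult then total else 0)
    let table3 := table2.insert "Full House"
      (if PySem.List.sorted (runs.map Prod.snd) (fun c => c) false = [2, 3] then 25 else 0)
    let table4 := table3.insert "Small Straight"
      (if 4 ≤ vals.length ∧ straight = true then 30 else 0)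
    let table5 := table4.insert "Large Straight"
      (if vals.length = 5 ∧ straight = true then 40 else 0)
    let table6 := table5.insert "Yahtzee" (if runs.length = 1 then 50 else 0)
    let table7 := table6.insert "Chance" total
    table7.getD choice 0

-- ===== PRECONDITION & SPEC =====
-- Pre_ excludes inputs where the category index is out of range (A raises IndexError), and
-- 'Full House' hands that are not exactly five dice: on fewer than five A raises IndexError,
-- and on more than five A's endpoints-of-the-sorted-list test is an artefact of assuming
-- exactly five dice, so both its and B's answer are defensible there.
def Pre_scoreTheDice (listCat : List String) (choiceIndex : Int) (nums : List Int) : Prop :=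
  PySem.Raise.InRange listCat.length choiceIndex ∧
  (PySem.List.pyGet? listCat choiceIndex = some "Full House" → nums.length = 5)

instance (listCat : List String) (choiceIndex : Int) (nums : List Int) : Decidable (Pre_scoreTheDice listCat choiceIndex nums) := by unfold Pre_scoreTheDice; infer_instance

def pvWitness_scoreTheDice : List String × Int × List Int := (["Chance"], 0, [1, 2, 3])

def Spec_scoreTheDice (listCat : List String) (choiceIndex : Int) (nums : List Int) (out : Int) : Prop := out = scoreTheDice_alt listCat choiceIndex nums
instance (listCat : List String) (choiceIndex : Int) (nums : List Int) (out : Int) : Decidable (Spec_scoreTheDice listCat choiceIndex nums out) := by unfold Spec_scoreTheDice; infer_instance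

-- ===== CLAIM (what is proved, stated in full; the proofs are below) =====
def Claim_equal_scoreTheDice : Prop := ∀ (listCat : List String) (choiceIndex : Int) (nums : List Int), Dom_scoreTheDice listCat choiceIndex nums → Pre_scoreTheDice listCat choiceIndex nums → Spec_scoreTheDice listCat choiceIndex nums (scoreTheDice listCat choiceIndex nums)

-- ===== LEMMAS AND PROOFS =====

theorem pvUnique_eq_ofList (l : List Int) : pvUnique l = PySem.Set.ofList l := by
  rw [PySem.Set.ofList_eq_foldl]
  unfold pvUnique
  congr 1
  funext acc x
  simp [PySem.Set.add, PySem.Set.contains]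

theorem pvKindLoop_eq (nums rest : List Int) (k : Nat) :
    pvKindLoop nums rest k = if ∃ i ∈ rest, k ≤ nums.count i then nums.sum else 0 := by
  induction rest with
  | nil => simp [pvKindLoop]
  | cons i t ih =>
    by_cases h : k ≤ nums.count i
    · simp [pvKindLoop, h]
    · simp only [pvKindLoop]
      rw [if_neg h, ih]
      by_cases h2 : ∃ x ∈ t, k ≤ nums.count x
      · rw [if_pos h2,
          if_pos (by rcases h2 with ⟨x, hx, hkx⟩; exact ⟨x, List.mem_cons_of_mem _ hx, hkx⟩)]
      · rw [if_neg h2, if_neg (by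
          rintro ⟨x, hx, hkx⟩
          rcases List.mem_cons.mp hx with rfl | hx'
          · exact h hkx
          · exact h2 ⟨x, hx', hkx⟩)]

-- the head value does not reappear after its run is dropped (sorted list)
theorem pvNotMem_dropWhile (v : Int) (l : List Int) (hl : l.Pairwise (· ≤ ·))
    (hlow : ∀ x ∈ l, v ≤ x) : v ∉ List.dropWhile (fun x => x == v) l := by
  induction l with
  | nil => simp
  | cons x r ih =>
    by_cases hx : x = v
    · rw [List.dropWhile_cons_of_pos (by simp [hx])]
      exact ih (List.pairwise_cons.mp hl).2 (fun y hy => hlow y (List.mem_cons_of_mem _ hy))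
    · rw [List.dropWhile_cons_of_neg (by simp [hx])]
      intro hmem
      rcases List.mem_cons.mp hmem with rfl | hv
      · exact hx rfl
      · have h1 : x ≤ v := (List.pairwise_cons.mp hl).1 v hv
        have h2 : v ≤ x := hlow x (by simp)
        exact hx (le_antisymm h1 h2)

-- the three structural facts about the run-length encoding of a sorted list
theorem pvRle_spec (s : List Int) (hs : s.Pairwise (· ≤ ·)) :
    (∀ p ∈ pvRle s, p.2 = (s.count p.1 : Int)) ∧
    (∀ v, v ∈ (pvRle s).map Prod.fst ↔ v ∈ s) ∧
    ((pvRle s).map Prod.fst).Pairwise (· < ·) := by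
  induction s using pvRle.induct with
  | case1 => simp [pvRle]
  | case2 v t ih =>
    set a := List.takeWhile (fun x => x == v) (v :: t) with ha_def
    set b := List.dropWhile (fun x => x == v) (v :: t) with hb_def
    have hab : a ++ b = v :: t := List.takeWhile_append_dropWhile
    have ha : ∀ x ∈ a, x = v := fun x hx => by
      have := List.mem_takeWhile_imp hx; simpa using this
    have hb_sub : b.Sublist (v :: t) := List.dropWhile_sublist _
    have hb_pw : b.Pairwise (· ≤ ·) := hs.sublist hb_sub
    have hlow : ∀ x ∈ (v :: t), v ≤ x := by
      intro x hx
      rcases List.mem_cons.mp hx with rfl | hx'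
      · exact le_refl x
      · exact (List.pairwise_cons.mp hs).1 x hx'
    have hvb : v ∉ b :=
      pvNotMem_dropWhile v (v :: t) hs hlow
    have hvlt : ∀ x ∈ b, v < x := by
      intro x hx
      have h1 : v ≤ x := hlow x (hb_sub.mem hx)
      rcases lt_or_eq_of_le h1 with h | h
      · exact h
      · exact absurd (h ▸ hx) hvb
    have hcv : (v :: t).count v = a.length := by
      conv_lhs => rw [← hab]
      rw [List.count_append, List.count_eq_zero.mpr hvb,
        List.count_eq_length.mpr (fun y hy => (ha y hy).symm)]
      omega
    have hcx : ∀ x ∈ b, (v :: t).count x = b.count x := by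
      intro x hx
      conv_lhs => rw [← hab]
      rw [List.count_append, List.count_eq_zero.mpr (by
        intro hxa
        exact absurd (ha x hxa) (ne_of_gt (hvlt x hx)))]
      omega
    obtain ⟨ih1, ih2, ih3⟩ := ih hb_pw
    have hrle : pvRle (v :: t) = (v, (a.length : Int)) :: pvRle b := by
      rw [pvRle]
    refine ⟨?_, ?_, ?_⟩
    · intro p hp
      rw [hrle] at hp
      rcases List.mem_cons.mp hp with rfl | hp'
      · simp [hcv]
      · have h1 := ih1 p hp'
        have hmem : p.1 ∈ b := (ih2 p.1).mp (List.mem_map_of_mem hp')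
        rw [h1, hcx p.1 hmem]
    · intro v'
      rw [hrle]
      simp only [List.map_cons, List.mem_cons]
      rw [ih2 v']
      constructor
      · rintro (rfl | hv')
        · exact Or.inl rfl
        · rcases List.mem_cons.mp (hb_sub.mem hv') with h | h
          · exact Or.inl h
          · exact Or.inr h
      · intro hv'
        have hv'' : v' ∈ a ++ b := by rw [hab]; exact List.mem_cons.mpr hv'
        rcases List.mem_append.mp hv'' with hva | hvb'
        · exact Or.inl (ha v' hva)
        · exact Or.inr hvb'
    · rw [hrle]
      simp only [List.map_cons]
      refine List.pairwise_cons.mpr ⟨?_, ih3⟩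
      intro y hy
      rcases List.mem_map.mp hy with ⟨p, hp, rfl⟩
      exact hvlt p.1 ((ih2 p.1).mp (List.mem_map_of_mem hp))

-- the runs reconstitute the sum of the list
theorem pvRle_sum (s : List Int) :
    ((pvRle s).map (fun p => p.1 * p.2)).sum = s.sum := by
  induction s using pvRle.induct with
  | case1 => simp [pvRle]
  | case2 v t ih =>
    set a := List.takeWhile (fun x => x == v) (v :: t) with ha_def
    set b := List.dropWhile (fun x => x == v) (v :: t) with hb_def
    have hab : a ++ b = v :: t := List.takeWhile_append_dropWhile
    have ha : ∀ x ∈ a, x = v := fun x hx => by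
      have := List.mem_takeWhile_imp hx; simpa using this
    have hsa : a.sum = (a.length : Int) * v := by
      rw [List.sum_eq_card_nsmul a v ha]
      simp
    have hsum : (v :: t).sum = a.sum + b.sum := by rw [← hab, List.sum_append]
    rw [pvRle]
    simp only [List.map_cons, List.sum_cons]
    rw [← ha_def, ← hb_def, ih, show v + t.sum = (v :: t).sum by simp, hsum, hsa]
    ring

theorem pvLe_maxD (xs : List Int) (v : Int) (hv : v ∈ xs) :
    v ≤ PySem.List.maxD xs (fun v => v) 0 := by
  have hdef : PySem.List.maxD xs (fun v => v) 0
      = (PySem.List.max? xs (fun v => v)).getD 0 := rfl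
  rw [hdef]
  cases hx : PySem.List.max? xs (fun v => v) with
  | none =>
    rw [PySem.List.max?_eq_none_iff] at hx
    subst hx; simp at hv
  | some m =>
    simpa using PySem.List.max?_isMax hx v hv

theorem pvMem_snd (nums : List Int) (c : Int) :
    c ∈ (pvRle (PySem.List.sorted nums (fun x => x) false)).map Prod.snd
      ↔ ∃ i ∈ nums, c = (nums.count i : Int) := by
  set s := PySem.List.sorted nums (fun x => x) false with hs_def
  have hperm : s.Perm nums := PySem.List.sorted_perm nums (fun x => x) false
  have hspw : s.Pairwise (· ≤ ·) := by
    have := PySem.List.sorted_pairwise nums (fun x => x); simpa [← hs_def] using this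
  obtain ⟨h1, h2, _⟩ := pvRle_spec s hspw
  constructor
  · intro hc
    rcases List.mem_map.mp hc with ⟨p, hp, rfl⟩
    have hmem : p.1 ∈ nums := hperm.mem_iff.mp ((h2 p.1).mp (List.mem_map_of_mem hp))
    exact ⟨p.1, hmem, by rw [h1 p hp, hperm.count_eq]⟩
  · rintro ⟨i, hi, rfl⟩
    have hifst : i ∈ (pvRle s).map Prod.fst := (h2 i).mpr (hperm.mem_iff.mpr hi)
    rcases List.mem_map.mp hifst with ⟨p, hp, rfl⟩
    refine List.mem_map.mpr ⟨p, hp, ?_⟩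
    rw [h1 p hp, hperm.count_eq]

theorem pvMaxval_ge_iff (nums : List Int) (k : Int) (hk : 1 ≤ k) :
    (k ≤ PySem.List.maxD
        ((pvRle (PySem.List.sorted nums (fun x => x) false)).map Prod.snd) (fun v => v) 0)
      ↔ ∃ i ∈ nums, k ≤ (nums.count i : Int) := by
  set xs := (pvRle (PySem.List.sorted nums (fun x => x) false)).map Prod.snd with hxs
  constructor
  · intro h
    have hdef : PySem.List.maxD xs (fun v => v) 0
        = (PySem.List.max? xs (fun v => v)).getD 0 := rfl
    rw [hdef] at h
    cases hx : PySem.List.max? xs (fun v => v) with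
    | none => rw [hx] at h; simp at h; omega
    | some m =>
      rw [hx] at h; simp at h
      have hm := PySem.List.max?_mem hx
      rcases (pvMem_snd nums m).mp hm with ⟨i, hi, rfl⟩
      exact ⟨i, hi, h⟩
  · rintro ⟨i, hi, hki⟩
    exact le_trans hki (pvLe_maxD _ _ ((pvMem_snd nums _).mpr ⟨i, hi, rfl⟩))

-- the face lookup 'next((c for v, c in runs if v == f), 0)' is the dice count of f
theorem pvFind_count (nums : List Int) (f : Int) :
    ((((pvRle (PySem.List.sorted nums (fun x => x) false)).find?
        (fun q => q.1 == f)).map Prod.snd).getD 0) = (nums.count f : Int) := by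
  set s := PySem.List.sorted nums (fun x => x) false with hs_def
  have hperm : s.Perm nums := PySem.List.sorted_perm nums (fun x => x) false
  have hspw : s.Pairwise (· ≤ ·) := by
    have := PySem.List.sorted_pairwise nums (fun x => x); simpa [← hs_def] using this
  obtain ⟨h1, h2, _⟩ := pvRle_spec s hspw
  cases hf : (pvRle s).find? (fun q => q.1 == f) with
  | none =>
    have hnot : f ∉ s := by
      intro hfs
      rcases List.mem_map.mp ((h2 f).mpr hfs) with ⟨p, hp, hpf⟩
      have := List.find?_eq_none.mp hf p hp
      simp [hpf] at this
    have : nums.count f = 0 := List.count_eq_zero.mpr (fun h => hnot (hperm.mem_iff.mpr h))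
    simp [this]
  | some p =>
    have hpf : p.1 = f := by have := List.find?_some hf; simpa using this
    have hp : p ∈ pvRle s := List.mem_of_find?_eq_some hf
    simp only [Option.map_some, Option.getD_some]
    rw [h1 p hp, hpf, hperm.count_eq]

-- the distinct run values ARE sorted(unique(nums))
theorem pvVals_eq (nums : List Int) :
    (pvRle (PySem.List.sorted nums (fun x => x) false)).map Prod.fst
      = PySem.List.sorted (PySem.Set.ofList nums) (fun x => x) false := by
  set s := PySem.List.sorted nums (fun x => x) false with hs_def
  have hperm : s.Perm nums := PySem.List.sorted_perm nums (fun x => x) false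
  have hspw : s.Pairwise (· ≤ ·) := by
    have := PySem.List.sorted_pairwise nums (fun x => x); simpa [← hs_def] using this
  obtain ⟨_, h2, h3⟩ := pvRle_spec s hspw
  refine (PySem.List.sorted_eq_of_perm_of_pairwise_lt _ _ _ ?_ (by simpa using h3)).symm
  refine List.perm_of_nodup_nodup_toFinset_eq (h3.imp ne_of_lt)
    (PySem.Set.nodup_ofList nums) ?_
  ext x
  simp only [List.mem_toFinset, PySem.Set.mem_ofList]
  rw [h2 x, hperm.mem_iff]

theorem pvCount_two_le (l : List Int) (a b : Int) (hab : a ≠ b) :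
    l.count a + l.count b ≤ l.length := by
  induction l with
  | nil => simp
  | cons x t ih =>
    simp only [List.count_cons, List.length_cons, beq_iff_eq]
    by_cases h1 : x = a <;> by_cases h2 : x = b
    · exact absurd (h1.symm.trans h2) hab
    · rw [if_pos h1, if_neg h2]; omega
    · rw [if_neg h1, if_pos h2]; omega
    · rw [if_neg h1, if_neg h2]; omega

theorem pvAll_of_count_two (l : List Int) (a b : Int) (hab : a ≠ b)
    (h : l.count a + l.count b = l.length) : ∀ x ∈ l, x = a ∨ x = b := by
  induction l with
  | nil => simp
  | cons x t ih =>
    intro y hy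
    have hle := pvCount_two_le t a b hab
    simp only [List.count_cons, List.length_cons, beq_iff_eq] at h
    rcases List.mem_cons.mp hy with rfl | hy'
    · by_contra hc
      rw [not_or] at hc
      rw [if_neg hc.1, if_neg hc.2] at h
      omega
    · refine ih ?_ y hy'
      by_cases h1 : x = a <;> by_cases h2 : x = b
      · exact absurd (h1.symm.trans h2) hab
      · rw [if_pos h1, if_neg h2] at h; omega
      · rw [if_neg h1, if_pos h2] at h; omega
      · rw [if_neg h1, if_neg h2] at h; omega

theorem pvNodup_two (u : List Int) (hu : u.Nodup) (a b : Int) (hab : a ≠ b)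
    (ha : a ∈ u) (hb : b ∈ u) (hsub : ∀ x ∈ u, x = a ∨ x = b) : u.length = 2 := by
  have h1 : u.toFinset = {a, b} := by
    ext x
    simp only [List.mem_toFinset, Finset.mem_insert, Finset.mem_singleton]
    constructor
    · intro hx; exact hsub x hx
    · rintro (rfl | rfl) <;> assumption
  have h2 := List.toFinset_card_of_nodup hu
  rw [h1, Finset.card_pair hab] at h2
  omega

theorem pvPairPerm (c d : Int) (h : [c, d].Perm [2, 3]) :
    (c = 2 ∧ d = 3) ∨ (c = 3 ∧ d = 2) := by
  have hc : c = 2 ∨ c = 3 := by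
    have : c ∈ ([2, 3] : List Int) := h.mem_iff.mp (by simp)
    simpa using this
  have hd : d = 2 ∨ d = 3 := by
    have : d ∈ ([2, 3] : List Int) := h.mem_iff.mp (by simp)
    simpa using this
  have hnd : c ≠ d := by
    have := h.nodup_iff.mpr (by decide)
    simpa using this
  rcases hc with rfl | rfl <;> rcases hd with rfl | rfl <;> simp_all

theorem pvLen2 (w : List (Int × Int)) (h : w.length = 2) :
    ∃ p q, w = [p, q] := by
  rcases w with _ | ⟨p, w⟩; · simp at h
  rcases w with _ | ⟨q, w⟩; · simp at h
  rcases w with _ | ⟨r, w⟩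
  · exact ⟨p, q, rfl⟩
  · simp at h

theorem pvLen5 (s : List Int) (h : s.length = 5) : ∃ a b c d e, s = [a, b, c, d, e] := by
  rcases s with _ | ⟨a, s⟩; · simp at h
  rcases s with _ | ⟨b, s⟩; · simp at h
  rcases s with _ | ⟨c, s⟩; · simp at h
  rcases s with _ | ⟨d, s⟩; · simp at h
  rcases s with _ | ⟨e, s⟩; · simp at h
  rcases s with _ | ⟨f, s⟩
  · exact ⟨a, b, c, d, e, rfl⟩
  · simp at h

-- Full House: A's endpoints-of-the-sorted-hand test agrees with B's sorted multiset of
-- multiplicities being [2, 3], on five dice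
theorem pvFH_fwd (nums : List Int) (h5 : nums.length = 5) (a e : Int)
    (ha : nums.count a = 2) (he : nums.count e = 3) :
    PySem.List.sorted
      ((pvRle (PySem.List.sorted nums (fun x => x) false)).map Prod.snd)
      (fun c => c) false = [2, 3] := by
  set s := PySem.List.sorted nums (fun x => x) false with hs_def
  have hperm : s.Perm nums := PySem.List.sorted_perm nums (fun x => x) false
  have hspw : s.Pairwise (· ≤ ·) := by
    have := PySem.List.sorted_pairwise nums (fun x => x); simpa [← hs_def] using this
  obtain ⟨h1, h2, h3⟩ := pvRle_spec s hspw
  have hae : a ≠ e := by intro h; rw [h, he] at ha; omega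
  have hall : ∀ x ∈ nums, x = a ∨ x = e :=
    pvAll_of_count_two nums a e hae (by omega)
  have hamem : a ∈ nums := List.count_pos_iff.mp (by omega)
  have hemem : e ∈ nums := List.count_pos_iff.mp (by omega)
  -- the run list has exactly two entries, for a and e
  have hfst_mem : ∀ v, v ∈ (pvRle s).map Prod.fst ↔ v ∈ nums := by
    intro v; rw [h2 v, hperm.mem_iff]
  have hlen2 : ((pvRle s).map Prod.fst).length = 2 :=
    pvNodup_two _ (h3.imp ne_of_lt) a e hae ((hfst_mem a).mpr hamem)
      ((hfst_mem e).mpr hemem) (fun x hx => hall x ((hfst_mem x).mp hx))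
  obtain ⟨p, q, hpq⟩ := pvLen2 (pvRle s) (by simpa using hlen2)
  have hp : p ∈ pvRle s := by rw [hpq]; simp
  have hq : q ∈ pvRle s := by rw [hpq]; simp
  have hps : p.2 = (nums.count p.1 : Int) := by rw [h1 p hp, hperm.count_eq]
  have hqs : q.2 = (nums.count q.1 : Int) := by rw [h1 q hq, hperm.count_eq]
  have hpmem : p.1 ∈ nums := (hfst_mem p.1).mp (List.mem_map_of_mem hp)
  have hqmem : q.1 ∈ nums := (hfst_mem q.1).mp (List.mem_map_of_mem hq)
  have hpqne : p.1 ≠ q.1 := by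
    have := h3
    rw [hpq] at this
    simpa using ne_of_lt (by simpa using this)
  -- {p.1, q.1} = {a, e}, so the multiplicities are {2, 3}
  have hcounts : (p.2 = 2 ∧ q.2 = 3) ∨ (p.2 = 3 ∧ q.2 = 2) := by
    rcases hall p.1 hpmem with hpa | hpe <;> rcases hall q.1 hqmem with hqa | hqe
    · exact absurd (hpa.trans hqa.symm) hpqne
    · exact Or.inl ⟨by rw [hps, hpa, ha]; norm_num, by rw [hqs, hqe, he]; norm_num⟩
    · exact Or.inr ⟨by rw [hps, hpe, he]; norm_num, by rw [hqs, hqa, ha]; norm_num⟩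
    · exact absurd (hpe.trans hqe.symm) hpqne
  rw [hpq]
  simp only [List.map_cons, List.map_nil]
  rcases hcounts with ⟨hp2, hq2⟩ | ⟨hp2, hq2⟩ <;> rw [hp2, hq2] <;> decide

theorem pvFH_bwd (nums : List Int) (a e : Int)
    (hamem : a ∈ nums) (hemem : e ∈ nums)
    (hbounds : ∀ x ∈ nums, a ≤ x ∧ x ≤ e)
    (hsorted : PySem.List.sorted
      ((pvRle (PySem.List.sorted nums (fun x => x) false)).map Prod.snd)
      (fun c => c) false = [2, 3]) :
    (nums.count a = 2 ∧ nums.count e = 3) ∨ (nums.count a = 3 ∧ nums.count e = 2) := by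
  set s := PySem.List.sorted nums (fun x => x) false with hs_def
  have hperm : s.Perm nums := PySem.List.sorted_perm nums (fun x => x) false
  have hspw : s.Pairwise (· ≤ ·) := by
    have := PySem.List.sorted_pairwise nums (fun x => x); simpa [← hs_def] using this
  obtain ⟨h1, h2, h3⟩ := pvRle_spec s hspw
  have hpermsnd : ((pvRle s).map Prod.snd).Perm [2, 3] := by
    have := PySem.List.sorted_perm
      (xs := (pvRle s).map Prod.snd) (key := fun c => c) (rev := false)
    rw [hsorted] at this
    exact this.symm
  obtain ⟨p, q, hpq⟩ := pvLen2 (pvRle s) (by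
    have := hpermsnd.length_eq; simpa using this)
  have hp : p ∈ pvRle s := by rw [hpq]; simp
  have hq : q ∈ pvRle s := by rw [hpq]; simp
  have hps : p.2 = (nums.count p.1 : Int) := by rw [h1 p hp, hperm.count_eq]
  have hqs : q.2 = (nums.count q.1 : Int) := by rw [h1 q hq, hperm.count_eq]
  have hplt : p.1 < q.1 := by
    have := h3; rw [hpq] at this; simpa using this
  have hmemiff : ∀ x, x ∈ nums ↔ (x = p.1 ∨ x = q.1) := by
    intro x
    rw [← hperm.mem_iff, ← h2 x, hpq]
    simp
  have hpmem : p.1 ∈ nums := (hmemiff p.1).mpr (Or.inl rfl)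
  have hqmem : q.1 ∈ nums := (hmemiff q.1).mpr (Or.inr rfl)
  -- a is the smallest value, e the largest
  have hap : a = p.1 := by
    rcases (hmemiff a).mp hamem with h | h
    · exact h
    · have h1' : a ≤ p.1 := (hbounds p.1 hpmem).1
      omega
  have heq : e = q.1 := by
    rcases (hmemiff e).mp hemem with h | h
    · have h1' : q.1 ≤ e := (hbounds q.1 hqmem).2
      omega
    · exact h
  have hcounts : (p.2 = 2 ∧ q.2 = 3) ∨ (p.2 = 3 ∧ q.2 = 2) := by
    refine pvPairPerm p.2 q.2 ?_
    have : (pvRle s).map Prod.snd = [p.2, q.2] := by rw [hpq]; simp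
    rw [← this]
    exact hpermsnd
  rw [hap, heq]
  rcases hcounts with ⟨hc1, hc2⟩ | ⟨hc1, hc2⟩
  · exact Or.inl ⟨by exact_mod_cast hps.symm.trans hc1, by exact_mod_cast hqs.symm.trans hc2⟩
  · exact Or.inr ⟨by exact_mod_cast hps.symm.trans hc1, by exact_mod_cast hqs.symm.trans hc2⟩

theorem pvGetNat (u : List Int) (k : Nat) (hk : k < u.length) :
    PySem.List.pyGetD u (k : Int) 0 = u[k] := by
  simp [PySem.List.pyGetD, PySem.List.pyGet?, PySem.List.pyIdx?, hk]

theorem pvConsec_getElem (u : List Int) :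
    pvConsec u = true ↔ ∀ (k : Nat) (_h : k + 1 < u.length), u[k + 1] = u[k] + 1 := by
  unfold pvConsec
  rw [List.all_eq_true]
  constructor
  · intro h k hk
    have hmem : ((k + 1 : Nat) : Int) ∈ PySem.List.pyRange 1 (u.length : Int) 1 := by
      rw [PySem.List.mem_pyRange_one]; push_cast; omega
    have h2 := h _ hmem
    simp only [beq_iff_eq] at h2
    have e1 : ((k + 1 : Nat) : Int) - 1 = ((k : Nat) : Int) := by push_cast; ring
    rw [e1, pvGetNat u (k + 1) hk, pvGetNat u k (by omega)] at h2
    exact h2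
  · intro h x hx
    rw [PySem.List.mem_pyRange_one] at hx
    obtain ⟨k, rfl, hk⟩ : ∃ k : Nat, x = ((k + 1 : Nat) : Int) ∧ k + 1 < u.length :=
      ⟨(x - 1).toNat, by push_cast; omega, by omega⟩
    simp only [beq_iff_eq]
    have e1 : ((k + 1 : Nat) : Int) - 1 = ((k : Nat) : Int) := by push_cast; ring
    rw [e1, pvGetNat u (k + 1) hk, pvGetNat u k (by omega)]
    exact h k hk

theorem pvConsec_iff_chain (u : List Int) :
    pvConsec u = true ↔ List.IsChain (fun x y => y = x + 1) u :=
  (pvConsec_getElem u).trans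
    (List.isChain_iff_getElem (R := fun x y => y = x + 1) (l := u)).symm

-- B's zip-with-the-tail test is the same chain condition
theorem pvZipAll_iff_chain (u : List Int) :
    ((u.zip (PySem.List.slice u (some 1) none)).all (fun p => p.2 == p.1 + 1) = true)
      ↔ List.IsChain (fun x y => y = x + 1) u := by
  rw [PySem.List.slice_from_one]
  induction u with
  | nil => simp
  | cons x t ih =>
    cases t with
    | nil => simp
    | cons y r =>
      simp only [List.tail_cons, List.zip_cons_cons, List.all_cons, Bool.and_eq_true,
        beq_iff_eq, List.isChain_cons_cons]
      rw [← ih]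
      simp only [List.tail_cons]

theorem pvStraight_eq (nums : List Int) :
    ((((pvRle (PySem.List.sorted nums (fun x => x) false)).map Prod.fst).zip
        (PySem.List.slice
          ((pvRle (PySem.List.sorted nums (fun x => x) false)).map Prod.fst)
          (some 1) none)).all (fun p => p.2 == p.1 + 1))
      = pvConsec (PySem.List.sorted (PySem.Set.ofList nums) (fun x => x) false) := by
  rw [← pvVals_eq]
  by_cases h : List.IsChain (fun x y => y = x + 1)
      ((pvRle (PySem.List.sorted nums (fun x => x) false)).map Prod.fst)
  · rw [(pvZipAll_iff_chain _).mpr h, (pvConsec_iff_chain _).mpr h]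
  · rw [Bool.eq_false_iff.mpr (fun hc => h ((pvZipAll_iff_chain _).mp hc)),
      Bool.eq_false_iff.mpr (fun hc => h ((pvConsec_iff_chain _).mp hc))]

theorem pvVals_len (nums : List Int) :
    ((pvRle (PySem.List.sorted nums (fun x => x) false)).map Prod.fst).length
      = (pvUnique nums).length := by
  rw [pvVals_eq, PySem.List.length_sorted, pvUnique_eq_ofList]

theorem pvTotal_eq (nums : List Int) :
    ((pvRle (PySem.List.sorted nums (fun x => x) false)).map (fun p => p.1 * p.2)).sum
      = nums.sum := by
  rw [pvRle_sum]
  exact (PySem.List.sorted_perm nums (fun x => x) false).sum_eq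

theorem pvFullHouse_eq (nums : List Int) (h5 : nums.length = 5) :
    (match PySem.List.pyGet? (PySem.List.sorted nums (fun x => x) false) 0,
           PySem.List.pyGet? (PySem.List.sorted nums (fun x => x) false) 4 with
     | some a, some b =>
       if (PySem.List.sorted nums (fun x => x) false).count a = 2 ∧
          (PySem.List.sorted nums (fun x => x) false).count b = 3 then (25 : Int)
       else if (PySem.List.sorted nums (fun x => x) false).count a = 3 ∧
          (PySem.List.sorted nums (fun x => x) false).count b = 2 then 25
       else 0
     | _, _ => 0)
    = (if PySem.List.sorted
          ((pvRle (PySem.List.sorted nums (fun x => x) false)).map Prod.snd)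
          (fun c => c) false = [2, 3] then 25 else 0) := by
  have hperm := PySem.List.sorted_perm (xs := nums) (key := fun x => x) (rev := false)
  have hpw := PySem.List.sorted_pairwise (xs := nums) (key := fun x => x)
  generalize hgs : PySem.List.sorted nums (fun x => x) false = s at hperm hpw ⊢
  have hlen : s.length = 5 := by rw [hperm.length_eq, h5]
  obtain ⟨a, b, c, d, e, rfl⟩ := pvLen5 s hlen
  have hg0 : PySem.List.pyGet? [a, b, c, d, e] 0 = some a := by
    simp [PySem.List.pyGet?, PySem.List.pyIdx?]
  have hg4 : PySem.List.pyGet? [a, b, c, d, e] 4 = some e := by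
    simp [PySem.List.pyGet?, PySem.List.pyIdx?]
  rw [hg0, hg4]
  have hca : ∀ x : Int, List.count x [a, b, c, d, e] = nums.count x := fun x => by
    rw [List.Perm.count_eq hperm]
  have hamem : a ∈ nums := hperm.mem_iff.mp (by simp)
  have hemem : e ∈ nums := hperm.mem_iff.mp (by simp)
  have hbounds : ∀ x ∈ nums, a ≤ x ∧ x ≤ e := by
    intro x hx
    have hxs : x ∈ [a, b, c, d, e] := hperm.mem_iff.mpr hx
    simp only [List.pairwise_cons, List.mem_cons, List.not_mem_nil] at hpw
    rcases hpw with ⟨hpa, hpb, hpc, hpd, -⟩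
    have h1 := hpa b (by tauto)
    have h2 := hpa e (by tauto)
    have h3 := hpb c (by tauto)
    have h4 := hpb e (by tauto)
    have h5' := hpc d (by tauto)
    have h6 := hpc e (by tauto)
    have h7 := hpd e (by tauto)
    simp only [List.mem_cons, List.not_mem_nil, or_false] at hxs
    rcases hxs with rfl | rfl | rfl | rfl | rfl <;> constructor <;> omega
  have hiff : ((nums.count a = 2 ∧ nums.count e = 3) ∨
        (nums.count a = 3 ∧ nums.count e = 2))
      ↔ PySem.List.sorted ((pvRle [a, b, c, d, e]).map Prod.snd)
          (fun c => c) false = [2, 3] := by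
    constructor
    · rintro (⟨h2, h3⟩ | ⟨h3, h2⟩)
      · have := pvFH_fwd nums h5 a e h2 h3; rwa [hgs] at this
      · have := pvFH_fwd nums h5 e a h2 h3; rwa [hgs] at this
    · intro hB
      refine pvFH_bwd nums a e hamem hemem hbounds ?_
      rwa [hgs]
  simp only [hca]
  by_cases hc1 : nums.count a = 2 ∧ nums.count e = 3
  · rw [if_pos hc1, if_pos (hiff.mp (Or.inl hc1))]
  · rw [if_neg hc1]
    by_cases hc2 : nums.count a = 3 ∧ nums.count e = 2
    · rw [if_pos hc2, if_pos (hiff.mp (Or.inr hc2))]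
    · rw [if_neg hc2, if_neg (fun hB => by
        rcases hiff.mpr hB with hh | hh
        · exact hc1 hh
        · exact hc2 hh)]

-- ===== VERDICT (by name: the statement is the Claim_ definition above) =====
theorem scoreTheDice_spec : Claim_equal_scoreTheDice := by
  unfold Claim_equal_scoreTheDice
  intro listCat choiceIndex nums _hdom hpre
  unfold Spec_scoreTheDice
  obtain ⟨hin, hfh⟩ := hpre
  unfold scoreTheDice scoreTheDice_alt
  cases hg : PySem.List.pyGet? listCat choiceIndex with
  | none => rfl
  | some choice =>
  dsimp only
  -- expand B's face table (the fold over the six enumerated face names)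
  simp only [pvFaces, PySem.List.enumerate_cons, PySem.List.enumerate_nil,
    List.foldl_cons, List.foldl_nil]
  by_cases h1 : choice = "Ones"
  · subst h1
    rw [if_pos rfl]
    simp [PySem.Dict.getD_insert, pvFind_count]
  by_cases h2 : choice = "Twos"
  · subst h2
    rw [if_neg h1, if_pos rfl]
    simp [PySem.Dict.getD_insert, pvFind_count]
  by_cases h3 : choice = "Threes"
  · subst h3
    rw [if_neg h1, if_neg h2, if_pos rfl]
    simp [PySem.Dict.getD_insert, pvFind_count]
  by_cases h4 : choice = "Fours"
  · subst h4
    rw [if_neg h1, if_neg h2, if_neg h3, if_pos rfl]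
    simp [PySem.Dict.getD_insert, pvFind_count]
  by_cases h5 : choice = "Fives"
  · subst h5
    rw [if_neg h1, if_neg h2, if_neg h3, if_neg h4, if_pos rfl]
    simp [PySem.Dict.getD_insert, pvFind_count]
  by_cases h6 : choice = "Sixes"
  · subst h6
    rw [if_neg h1, if_neg h2, if_neg h3, if_neg h4, if_neg h5, if_pos rfl]
    simp [PySem.Dict.getD_insert, pvFind_count]
  rw [if_neg h1, if_neg h2, if_neg h3, if_neg h4, if_neg h5, if_neg h6]
  by_cases h7 : choice = "3 of a Kind"
  · subst h7
    rw [if_pos rfl]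
    simp only [PySem.Dict.getD_insert, PySem.Dict.getD_empty, String.reduceEq, reduceIte]
    norm_num [pvKindLoop_eq, pvTotal_eq]
    by_cases hx : ∃ i ∈ nums, 3 ≤ nums.count i
    · rw [if_pos hx, if_pos ((pvMaxval_ge_iff nums 3 (by norm_num)).mpr (by
        obtain ⟨i, hi, hc⟩ := hx; exact ⟨i, hi, by exact_mod_cast hc⟩))]
    · rw [if_neg hx, if_neg (fun hmax => hx (by
        obtain ⟨i, hi, hc⟩ := (pvMaxval_ge_iff nums 3 (by norm_num)).mp hmax
        exact ⟨i, hi, by exact_mod_cast hc⟩))]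
  by_cases h8 : choice = "4 of a Kind"
  · subst h8
    rw [if_neg h7, if_pos rfl]
    simp only [PySem.Dict.getD_insert, PySem.Dict.getD_empty, String.reduceEq, reduceIte]
    norm_num [pvKindLoop_eq, pvTotal_eq]
    by_cases hx : ∃ i ∈ nums, 4 ≤ nums.count i
    · rw [if_pos hx, if_pos ((pvMaxval_ge_iff nums 4 (by norm_num)).mpr (by
        obtain ⟨i, hi, hc⟩ := hx; exact ⟨i, hi, by exact_mod_cast hc⟩))]
    · rw [if_neg hx, if_neg (fun hmax => hx (by
        obtain ⟨i, hi, hc⟩ := (pvMaxval_ge_iff nums 4 (by norm_num)).mp hmax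
        exact ⟨i, hi, by exact_mod_cast hc⟩))]
  by_cases h9 : choice = "Full House"
  · subst h9
    rw [if_neg h7, if_neg h8, if_pos rfl]
    simp only [PySem.Dict.getD_insert, PySem.Dict.getD_empty, String.reduceEq, reduceIte]
    exact pvFullHouse_eq nums (hfh hg)
  by_cases h10 : choice = "Small Straight"
  · subst h10
    rw [if_neg h7, if_neg h8, if_neg h9, if_pos rfl]
    simp only [PySem.Dict.getD_insert, PySem.Dict.getD_empty, String.reduceEq, reduceIte]
    norm_num [pvUnique_eq_ofList]
    rw [pvStraight_eq, pvVals_eq]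
    simp [PySem.List.length_sorted]
  by_cases h11 : choice = "Large Straight"
  · subst h11
    rw [if_neg h7, if_neg h8, if_neg h9, if_neg h10, if_pos rfl]
    simp only [PySem.Dict.getD_insert, PySem.Dict.getD_empty, String.reduceEq, reduceIte]
    norm_num [pvUnique_eq_ofList]
    rw [pvStraight_eq, pvVals_eq]
    simp [PySem.List.length_sorted]
  by_cases h12 : choice = "Yahtzee"
  · subst h12
    rw [if_neg h7, if_neg h8, if_neg h9, if_neg h10, if_neg h11, if_pos rfl]
    simp only [PySem.Dict.getD_insert, PySem.Dict.getD_empty, String.reduceEq, reduceIte]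
    have hl : (pvRle (PySem.List.sorted nums (fun x => x) false)).length
        = (pvUnique nums).length := by
      rw [← pvVals_len nums, List.length_map]
    rw [hl]
  by_cases h13 : choice = "Chance"
  · subst h13
    rw [if_neg h7, if_neg h8, if_neg h9, if_neg h10, if_neg h11, if_neg h12]
    simp only [PySem.Dict.getD_insert, PySem.Dict.getD_empty, String.reduceEq, reduceIte]
    norm_num [pvTotal_eq]
  rw [if_neg h7, if_neg h8, if_neg h9, if_neg h10, if_neg h11, if_neg h12, if_neg h13]
  simp [PySem.Dict.getD_insert, h1, h2, h3, h4, h5, h6, h7, h8, h9, h10, h11, h12, h13]
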